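-- pv_equiv track=rewrite | github.com/hi-godot/godot-ai | tests/unit/test_self_update_rescue_contract.py | _read_manifest_broken
-- ===== SOURCE A (Python) =====
-- ZIP_ADDON_PREFIX = "addons/godot_ai/"
--
-- def _is_safe_zip_addon_file(file_path: str) -> bool:
--     """Subset of `update_reload_runner.gd::_is_safe_zip_addon_file`.
--
--     GDScript's `is_absolute_path()` also rejects Windows drive letters and
--     `res://` / `user://` schemes. Zip entries can't carry those, so this port
--     only mirrors the cases reachable from a real zip namelist.
--     """
--     if file_path.startswith("/") or "\\" in file_path:
--         return False
--     if not file_path.startswith(ZIP_ADDON_PREFIX):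
--         return False
--     rel_path = file_path[len(ZIP_ADDON_PREFIX) :]
--     if not rel_path or rel_path.endswith("/"):
--         return False
--     for segment in rel_path.split("/"):
--         if not segment or segment in (".", ".."):
--             return False
--     return True
--
-- def _read_manifest_broken(zip_entries: list[str]) -> bool:
--     """Models the v2.2.x/v2.3.0 runner: only the rel-path-empty skip."""
--     has_plugin_cfg = False
--     has_plugin_script = False
--     for file_path in zip_entries:
--         if not file_path.startswith(ZIP_ADDON_PREFIX):
--             continue
--         rel_path = file_path[len(ZIP_ADDON_PREFIX) :]
--         if not rel_path:
--             continue
--         if not _is_safe_zip_addon_file(file_path):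
--             return False
--         if rel_path == "plugin.cfg":
--             has_plugin_cfg = True
--         elif rel_path == "plugin.gd":
--             has_plugin_script = True
--     return has_plugin_cfg and has_plugin_script
-- ===== SOURCE B (Python) =====
-- ZIP_ADDON_PREFIX = "addons/godot_ai/"
--
-- def _is_safe_zip_addon_file(file_path: str) -> bool:
--     if file_path.startswith("/") or "\\" in file_path:
--         return False
--     if not file_path.startswith(ZIP_ADDON_PREFIX):
--         return False
--     rel_path = file_path[len(ZIP_ADDON_PREFIX):]
--     if not rel_path or rel_path.endswith("/"):
--         return False
--     for segment in rel_path.split("/"):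
--         if not segment or segment in (".", ".."):
--             return False
--     return True
--
-- def _read_manifest_broken(zip_entries: list[str]) -> bool:
--     # One unsafe addon entry (prefixed, non-empty rel path) sinks the manifest.
--     if any(p.startswith(ZIP_ADDON_PREFIX)
--            and p[len(ZIP_ADDON_PREFIX):]
--            and not _is_safe_zip_addon_file(p)
--            for p in zip_entries):
--         return False
--     # Presence: the two required files, looked up as full zip paths directly.
--     return all(ZIP_ADDON_PREFIX + name in zip_entries
--                for name in ("plugin.cfg", "plugin.gd"))
-- ===== Notes on version B (the rewrite author's own statement) =====
-- stated objective: simpler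
-- what changed: Instead of one stateful loop stripping prefixes and tracking two boolean flags with early exit, B makes one any() safety scan and then checks presence of the two required files by direct membership of their constructed full zip paths in the original list (no rel-path accumulation, no flags).
import Mathlib
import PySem

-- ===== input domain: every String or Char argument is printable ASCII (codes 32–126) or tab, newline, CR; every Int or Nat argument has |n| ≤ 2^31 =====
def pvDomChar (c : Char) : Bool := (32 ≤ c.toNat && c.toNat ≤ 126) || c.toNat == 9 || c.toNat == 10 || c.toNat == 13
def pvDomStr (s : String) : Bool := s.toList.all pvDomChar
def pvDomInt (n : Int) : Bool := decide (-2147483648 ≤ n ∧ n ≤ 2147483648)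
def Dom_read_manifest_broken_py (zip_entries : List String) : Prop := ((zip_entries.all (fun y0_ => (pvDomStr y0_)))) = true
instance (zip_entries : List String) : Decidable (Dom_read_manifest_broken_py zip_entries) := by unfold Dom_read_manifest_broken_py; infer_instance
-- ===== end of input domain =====

-- B drops A's stateful flag loop: one any() safety scan, then presence of the two required
-- files checked by direct membership of their constructed full zip paths (simpler, same cost).

-- ===== PORT A =====
def ZIP_ADDON_PREFIX : String := "addons/godot_ai/"

-- shared helper (both Pythons contain the identical _is_safe_zip_addon_file)
def is_safe_zip_addon_file (file_path : String) : Bool :=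
  if PySem.Str.startswith file_path "/" || PySem.Str.isIn "\\" file_path then false
  else if !(PySem.Str.startswith file_path ZIP_ADDON_PREFIX) then false
  else
    let rel_path := PySem.Str.slice file_path (some 16) none   -- file_path[len(prefix):], len = 16
    if rel_path == "" || PySem.Str.endswith rel_path "/" then false
    -- rel_path.split("/"): ported via PySem.Chars.splitOn on the code-point list (sep ≠ "")
    else (PySem.Chars.splitOn rel_path.toList "/".toList).all
      (fun segment => !(segment == "".toList || segment == ".".toList || segment == "..".toList))

-- A's loop, with its two flags, as structural recursion (early `return False` = result false)
def readManifestLoopA : List String → Bool → Bool → Bool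
  | [], has_plugin_cfg, has_plugin_script => has_plugin_cfg && has_plugin_script
  | file_path :: rest, has_plugin_cfg, has_plugin_script =>
    if !(PySem.Str.startswith file_path ZIP_ADDON_PREFIX) then
      readManifestLoopA rest has_plugin_cfg has_plugin_script
    else
      let rel_path := PySem.Str.slice file_path (some 16) none
      if rel_path == "" then readManifestLoopA rest has_plugin_cfg has_plugin_script
      else if !(is_safe_zip_addon_file file_path) then false
      else if rel_path == "plugin.cfg" then readManifestLoopA rest true has_plugin_script
      else if rel_path == "plugin.gd" then readManifestLoopA rest has_plugin_cfg true
      else readManifestLoopA rest has_plugin_cfg has_plugin_script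

def read_manifest_broken_py (zip_entries : List String) : Bool :=
  readManifestLoopA zip_entries false false

-- ===== PORT B =====
def read_manifest_broken_py_alt (zip_entries : List String) : Bool :=
  if zip_entries.any (fun p =>
      PySem.Str.startswith p ZIP_ADDON_PREFIX
        && !(PySem.Str.slice p (some 16) none == "")
        && !(is_safe_zip_addon_file p)) then false
  else
    ["plugin.cfg", "plugin.gd"].all
      (fun name => zip_entries.contains (ZIP_ADDON_PREFIX ++ name))

-- ===== PRECONDITION & SPEC =====
def Spec_read_manifest_broken_py (zip_entries : List String) (out : Bool) : Prop := out = read_manifest_broken_py_alt zip_entries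
instance (zip_entries : List String) (out : Bool) : Decidable (Spec_read_manifest_broken_py zip_entries out) := by unfold Spec_read_manifest_broken_py; infer_instance

-- ===== CLAIM (what is proved, stated in full; the proofs are below) =====
def Claim_equal_read_manifest_broken_py : Prop := ∀ (zip_entries : List String), Dom_read_manifest_broken_py zip_entries → Spec_read_manifest_broken_py zip_entries (read_manifest_broken_py zip_entries)

-- ===== LEMMAS AND PROOFS =====

-- the entries A's loop acts on: prefixed, non-empty rel path; paired with the rel path
def relevA (zs : List String) : List (String × String) :=
  (zs.filter (fun p =>
      PySem.Str.startswith p ZIP_ADDON_PREFIX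
        && !(PySem.Str.slice p (some 16) none == ""))).map
    (fun p => (p, PySem.Str.slice p (some 16) none))

def rhsA (zs : List String) (cfg gd : Bool) : Bool :=
  if (relevA zs).all (fun pr => is_safe_zip_addon_file pr.1) then
    (cfg || ((relevA zs).map Prod.snd).contains "plugin.cfg")
      && (gd || ((relevA zs).map Prod.snd).contains "plugin.gd")
  else false

theorem relevA_cons_pos (p : String) (rest : List String)
    (h1 : PySem.Chars.startswith p.toList ZIP_ADDON_PREFIX.toList = true)
    (h2 : (PySem.Str.slice p (some 16) none == "") = false) :
    relevA (p :: rest) = (p, PySem.Str.slice p (some 16) none) :: relevA rest := by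
  simp [relevA, h1, h2]

theorem relevA_cons_neg (p : String) (rest : List String)
    (h : (PySem.Str.startswith p ZIP_ADDON_PREFIX
            && !(PySem.Str.slice p (some 16) none == "")) = false) :
    relevA (p :: rest) = relevA rest := by
  simp only [relevA, List.filter_cons, h]; rfl

-- characterisation of A's loop: unsafe relevant entry anywhere → false; else flags OR presence
theorem loopA_char (zs : List String) (cfg gd : Bool) :
    readManifestLoopA zs cfg gd = rhsA zs cfg gd := by
  induction zs generalizing cfg gd with
  | nil => simp [readManifestLoopA, rhsA, relevA]
  | cons p rest ih =>
    simp only [readManifestLoopA]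
    by_cases h1 : PySem.Chars.startswith p.toList ZIP_ADDON_PREFIX.toList = true
    · by_cases h2 : (PySem.Str.slice p (some 16) none == "") = true
      · rw [if_neg (by simp [h1]), if_pos h2, ih]
        unfold rhsA
        rw [relevA_cons_neg p rest (by simp [h2])]
      · have h2' := eq_false_of_ne_true h2
        have hc := relevA_cons_pos p rest h1 h2'
        by_cases h3 : is_safe_zip_addon_file p = true
        · have hrel : ∀ c g : Bool, rhsA (p :: rest) c g =
              (if (relevA rest).all (fun pr => is_safe_zip_addon_file pr.1) then
                ((c || (PySem.Str.slice p (some 16) none == "plugin.cfg")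
                    || ((relevA rest).map Prod.snd).contains "plugin.cfg")
                  && (g || (PySem.Str.slice p (some 16) none == "plugin.gd")
                    || ((relevA rest).map Prod.snd).contains "plugin.gd"))
              else false) := by
            intro c g
            unfold rhsA
            rw [hc]
            simp [h3, Bool.or_assoc, BEq.comm]
          rw [if_neg (by simp [h1]), if_neg (by simp [h2']), if_neg (by simp [h3]), hrel]
          by_cases h4 : (PySem.Str.slice p (some 16) none == "plugin.cfg") = true
          · have h5 : (PySem.Str.slice p (some 16) none == "plugin.gd") = false := by
              rw [eq_of_beq h4]; decide
            rw [if_pos h4, ih]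
            unfold rhsA
            split <;> simp [h4, h5]
          · have h4' := eq_false_of_ne_true h4
            by_cases h5 : (PySem.Str.slice p (some 16) none == "plugin.gd") = true
            · rw [if_neg (by simp [h4']), if_pos h5, ih]
              unfold rhsA
              split <;> simp [h4', h5]
            · have h5' := eq_false_of_ne_true h5
              rw [if_neg (by simp [h4']), if_neg (by simp [h5']), ih]
              unfold rhsA
              split <;> simp [h4', h5']
        · have h3' := eq_false_of_ne_true h3
          rw [if_neg (by simp [h1]), if_neg (by simp [h2']), if_pos (by simp [h3'])]
          unfold rhsA
          rw [hc]
          simp [h3']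
    · have h1' := eq_false_of_ne_true h1
      rw [if_pos (by simp [h1']), ih]
      unfold rhsA
      rw [relevA_cons_neg p rest (by simp [h1'])]

-- a single entry strips to rel path r (r ≠ "") iff it IS the full path PREFIX ++ r
theorem entry_iff (p r : String) :
    (PySem.Chars.startswith p.toList ZIP_ADDON_PREFIX.toList = true
      ∧ PySem.Str.slice p (some 16) none = r) ↔ p = ZIP_ADDON_PREFIX ++ r := by
  have hlen : ZIP_ADDON_PREFIX.toList.length = 16 := by decide
  constructor
  · rintro ⟨hsw, hsl⟩
    obtain ⟨t, ht⟩ := (PySem.Chars.startswith_iff _ _).mp hsw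
    have hdrop : (PySem.Str.slice p (some 16) none).toList = p.toList.drop 16 := by
      simp [PySem.Str.toList_slice]
      rw [show ((16:Int)) = ((16:Nat):Int) by norm_num, PySem.List.slice_from_natCast]
    have : p.toList = (ZIP_ADDON_PREFIX ++ r).toList := by
      rw [String.toList_append]
      conv_lhs => rw [← ht]
      congr 1
      have := congrArg String.toList hsl
      rw [hdrop, ← ht, ← hlen, List.drop_left] at this
      exact this
    exact String.toList_inj.mp this
  · rintro rfl
    refine ⟨(PySem.Chars.startswith_iff _ _).mpr (by simp), ?_⟩
    apply String.toList_inj.mp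
    simp [PySem.Str.toList_slice]
    rw [show ((16:Int)) = ((16:Nat):Int) by norm_num, PySem.List.slice_from_natCast]
    rw [← hlen]
    exact List.drop_left

-- presence of rel path r among relevant entries = membership of the full path in the list
theorem presence_char (zs : List String) (r : String) (hr : r.toList ≠ []) :
    ((relevA zs).map Prod.snd).contains r = zs.contains (ZIP_ADDON_PREFIX ++ r) := by
  rw [List.contains_eq_mem, List.contains_eq_mem, decide_eq_decide]
  unfold relevA
  simp only [List.map_map, List.mem_map, List.mem_filter, Function.comp]
  constructor
  · rintro ⟨p, ⟨hp, hpred⟩, hsl⟩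
    have h1 : PySem.Chars.startswith p.toList ZIP_ADDON_PREFIX.toList = true := by
      simp only [PySem.Str.startswith_eq] at hpred
      exact (Bool.and_eq_true _ _ |>.mp hpred).1
    have := (entry_iff p r).mp ⟨h1, hsl⟩
    rwa [this] at hp
  · intro h
    refine ⟨ZIP_ADDON_PREFIX ++ r, ⟨h, ?_⟩, ?_⟩
    · have := (entry_iff (ZIP_ADDON_PREFIX ++ r) r).mpr rfl
      have h2 : (PySem.Str.slice (ZIP_ADDON_PREFIX ++ r) (some 16) none == "") = false := by
        rw [this.2]
        rcases hb : (r == "") with _ | _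
        · rfl
        · exact absurd (congrArg String.toList (eq_of_beq hb)) hr
      simp [h2]
      rw [PySem.Chars.startswith_iff]
      exact List.prefix_append _ _
    · exact ((entry_iff (ZIP_ADDON_PREFIX ++ r) r).mpr rfl).2

-- B's any() safety scan = failure of A's all-relevant-safe condition
theorem anyscan_char (zs : List String) :
    zs.any (fun p =>
        PySem.Str.startswith p ZIP_ADDON_PREFIX
          && !(PySem.Str.slice p (some 16) none == "")
          && !(is_safe_zip_addon_file p))
      = !((relevA zs).all (fun pr => is_safe_zip_addon_file pr.1)) := by
  induction zs with
  | nil => simp [relevA]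
  | cons p rest ih =>
    by_cases hpred : (PySem.Str.startswith p ZIP_ADDON_PREFIX
        && !(PySem.Str.slice p (some 16) none == "")) = true
    · obtain ⟨h1, h2⟩ := Bool.and_eq_true _ _ |>.mp hpred
      rw [relevA_cons_pos p rest (by simpa using h1) (by simpa using h2)]
      simp only [List.any_cons, List.all_cons, ih]
      rw [show (PySem.Str.startswith p ZIP_ADDON_PREFIX
        && !(PySem.Str.slice p (some 16) none == "")
        && !(is_safe_zip_addon_file p))
        = ((PySem.Str.startswith p ZIP_ADDON_PREFIX
            && !(PySem.Str.slice p (some 16) none == ""))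
          && !(is_safe_zip_addon_file p)) from by rw [Bool.and_assoc], hpred]
      cases is_safe_zip_addon_file p <;> simp
    · have hpred' := eq_false_of_ne_true hpred
      rw [relevA_cons_neg p rest hpred']
      simp only [List.any_cons, ih]
      rw [show (PySem.Str.startswith p ZIP_ADDON_PREFIX
        && !(PySem.Str.slice p (some 16) none == "")
        && !(is_safe_zip_addon_file p))
        = ((PySem.Str.startswith p ZIP_ADDON_PREFIX
            && !(PySem.Str.slice p (some 16) none == ""))
          && !(is_safe_zip_addon_file p)) from by rw [Bool.and_assoc], hpred']
      simp

-- ===== VERDICT (by name: the statement is the Claim_ definition above) =====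
theorem read_manifest_broken_py_spec : Claim_equal_read_manifest_broken_py := by
  intro zs _
  unfold Spec_read_manifest_broken_py read_manifest_broken_py read_manifest_broken_py_alt
  rw [loopA_char, anyscan_char]
  unfold rhsA
  by_cases hall : (relevA zs).all (fun pr => is_safe_zip_addon_file pr.1) = true
  · rw [if_pos hall, hall]
    simp only [Bool.not_true, if_neg (by simp : ¬ (false = true)), List.all_cons, List.all_nil,
      Bool.false_or, Bool.and_true]
    rw [presence_char zs "plugin.cfg" (by decide), presence_char zs "plugin.gd" (by decide)]
  · have h := eq_false_of_ne_true hall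
    rw [if_neg (by simp [h]), h]
    simp
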